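-- pv_equiv track=rewrite | github.com/Zellic/remindme | timeparse.py | _split_into_parts
-- ===== SOURCE A (Python) =====
-- def _split_into_parts(raw: str) -> list[str]:
--     """Break string into alternating digit/letter tokens, ignoring commas and whitespace."""
--     parts: list[str] = []
--     buf: list[str] = []
--
--     for ch in raw:
--         if ch.isdigit() or ch.isalpha():
--             if buf and (buf[-1].isalpha() != ch.isalpha()):
--                 parts.append("".join(buf))
--                 buf.clear()
--             buf.append(ch)
--         elif ch.isspace() or ch == ",":
--             if buf:
--                 parts.append("".join(buf))
--                 buf.clear()
--         else:
--             raise ValueError(f"Invalid character for duration: {ch!r}")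
--
--     if buf:
--         parts.append("".join(buf))
--
--     return parts
-- ===== SOURCE B (Python) =====
-- def _kind(ch: str) -> int:
--     if ch.isdigit():
--         return 0
--     if ch.isalpha():
--         return 1
--     return 2
--
--
-- def _split_into_parts(raw: str) -> list[str]:
--     """Break string into alternating digit/letter tokens, ignoring commas and whitespace."""
--     for ch in raw:
--         if not (ch.isdigit() or ch.isalpha() or ch.isspace() or ch == ","):
--             raise ValueError(f"Invalid character for duration: {ch!r}")
--     parts: list[str] = []
--     rest = raw
--     while rest:
--         k = _kind(rest[0])
--         n = 1
--         while n < len(rest) and _kind(rest[n]) == k: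
--             n += 1
--         if k != 2:
--             parts.append(rest[:n])
--         rest = rest[n:]
--     return parts
-- ===== Notes on version B (the rewrite author's own statement) =====
-- stated objective: alternative
-- what changed: A builds tokens with a character buffer flushed on kind change or separator; B first validates all characters, then repeatedly slices each maximal run of same-kind characters off the front of the string, keeping digit/letter runs and discarding separator runs.
import Mathlib
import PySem

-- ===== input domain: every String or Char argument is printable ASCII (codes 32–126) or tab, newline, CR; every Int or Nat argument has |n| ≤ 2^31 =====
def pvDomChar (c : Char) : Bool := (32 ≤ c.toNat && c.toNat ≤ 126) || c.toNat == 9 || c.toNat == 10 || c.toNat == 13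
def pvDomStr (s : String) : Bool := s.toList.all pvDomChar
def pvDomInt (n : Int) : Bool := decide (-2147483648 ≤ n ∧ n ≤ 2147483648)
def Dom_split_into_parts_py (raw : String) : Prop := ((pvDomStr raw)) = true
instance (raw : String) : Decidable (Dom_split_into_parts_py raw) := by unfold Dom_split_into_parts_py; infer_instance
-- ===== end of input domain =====

-- B replaces A's flush-on-change character buffer with a run scanner that slices
-- each maximal same-kind run out of the string at once (objective: alternative).

-- ===== PORT A =====
-- for ch in raw, with state (parts, buf); the else branch raises ValueError in
-- Python — those inputs are excluded by Pre_, the port leaves the state unchanged.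
def pvA_loop : List Char → List String → List Char → List String
  | [], parts, buf => if buf.isEmpty then parts else parts ++ [String.mk buf]
  | ch :: rest, parts, buf =>
    if PySem.Chars.isdigit ch || PySem.Chars.isalpha ch then
      if !buf.isEmpty && (PySem.Chars.isalpha (buf.getLastD ' ') != PySem.Chars.isalpha ch) then
        pvA_loop rest (parts ++ [String.mk buf]) [ch]
      else
        pvA_loop rest parts (buf ++ [ch])
    else if PySem.Chars.isspace ch || ch == ',' then
      if buf.isEmpty then pvA_loop rest parts buf
      else pvA_loop rest (parts ++ [String.mk buf]) []
    else
      pvA_loop rest parts buf  -- Python: raise ValueError (outside Pre_)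

def split_into_parts_py (raw : String) : List String := pvA_loop raw.toList [] []

-- ===== PORT B =====
def pvKind (c : Char) : Nat :=
  if PySem.Chars.isdigit c then 0 else if PySem.Chars.isalpha c then 1 else 2

-- inner 'while n < len(rest) and _kind(rest[n]) == k: n += 1'
-- (rest.getD n ' ' = rest[n] exactly, since the loop guard gives 0 ≤ n < len)
def pvRunLen (cs : List Char) (k : Nat) (n : Nat) : Nat :=
  if h : n < cs.length ∧ pvKind (cs.getD n ' ') = k then pvRunLen cs k (n + 1) else n
termination_by cs.length - n
decreasing_by omega

theorem pvRunLen_ge (cs : List Char) (k n : Nat) : n ≤ pvRunLen cs k n := by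
  fun_induction pvRunLen cs k n with
  | case1 n h ih => omega
  | case2 n h => omega

-- outer 'while rest:' — rest[:n] / rest[n:] are take / drop (0 ≤ n ≤ len here, exact)
def pvB_loop (rest : List Char) (parts : List String) : List String :=
  if hne : rest.isEmpty then parts
  else
    let k := pvKind (rest.getD 0 ' ')
    let n := pvRunLen rest k 1
    pvB_loop (rest.drop n)
      (if k ≠ 2 then parts ++ [String.mk (rest.take n)] else parts)
termination_by rest.length
decreasing_by
  have h1 : 1 ≤ pvRunLen rest (pvKind (rest.getD 0 ' ')) 1 := pvRunLen_ge _ _ _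
  have h2 : 0 < rest.length := by
    simp [List.isEmpty_iff] at hne
    exact List.length_pos_iff.mpr hne
  simp only [List.length_drop]; omega

-- validation pass: 'for ch in raw: raise unless valid' — Pre_ excludes the raise
def pvValid (c : Char) : Bool :=
  PySem.Chars.isdigit c || PySem.Chars.isalpha c || PySem.Chars.isspace c || c == ','

def split_into_parts_py_alt (raw : String) : List String :=
  -- B's validation for-loop either raises ValueError (outside Pre_) or binds
  -- nothing; it contributes no value, so the port goes straight to the scanner
  pvB_loop raw.toList []

-- ===== PRECONDITION & SPEC =====
-- Pre_ excludes exactly the inputs containing a character that is not a digit,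
-- letter, whitespace or comma: A raises ValueError there.
def Pre_split_into_parts_py (raw : String) : Prop :=
  raw.toList.all pvValid = true
instance (raw : String) : Decidable (Pre_split_into_parts_py raw) := by
  unfold Pre_split_into_parts_py; infer_instance

def pvWitness_split_into_parts_py : String := "12 days, 3h"

def Spec_split_into_parts_py (raw : String) (out : List String) : Prop := out = split_into_parts_py_alt raw
instance (raw : String) (out : List String) : Decidable (Spec_split_into_parts_py raw out) := by unfold Spec_split_into_parts_py; infer_instance

-- ===== CLAIM (what is proved, stated in full; the proofs are below) =====
def Claim_equal_split_into_parts_py : Prop := ∀ (raw : String), Dom_split_into_parts_py raw → Pre_split_into_parts_py raw → Spec_split_into_parts_py raw (split_into_parts_py raw)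

-- ===== LEMMAS AND PROOFS =====

-- reference grouping function both ports are proved equal to
def pvG : List Char → List String
  | [] => []
  | c :: cs =>
    let p : Char → Bool := fun d => decide (pvKind d = pvKind c)
    (if pvKind c ≠ 2 then [String.mk (c :: cs.takeWhile p)] else []) ++
      pvG (cs.dropWhile p)
termination_by l => l.length
decreasing_by
  have := List.length_dropWhile_le (fun d => decide (pvKind d = pvKind c)) cs
  simpa using Nat.lt_succ_of_le this

theorem pvG_nil : pvG [] = [] := by simp [pvG]

theorem pvG_cons (c : Char) (cs : List Char) :
    pvG (c :: cs) =
      (if pvKind c ≠ 2 then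
        [String.mk (c :: cs.takeWhile (fun d => decide (pvKind d = pvKind c)))] else []) ++
        pvG (cs.dropWhile (fun d => decide (pvKind d = pvKind c))) := by
  rw [pvG]

theorem pvG_dropWhile_sep (cs : List Char) :
    pvG (cs.dropWhile (fun d => decide (pvKind d = 2))) = pvG cs := by
  induction cs with
  | nil => simp
  | cons c cs ih =>
    by_cases h : pvKind c = 2
    · rw [List.dropWhile_cons_of_pos (by simp [h]), ih, pvG_cons]
      simp [h]
      rw [ih]
    · rw [List.dropWhile_cons_of_neg (by simp [h])]

theorem pvG_cons_sep (c : Char) (cs : List Char) (h : pvKind c = 2) :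
    pvG (c :: cs) = pvG cs := by
  rw [pvG_cons]
  simp [h]
  exact pvG_dropWhile_sep cs

-- kind facts on valid characters
theorem pvKind_ne_two_iff (c : Char) :
    pvKind c ≠ 2 ↔ (PySem.Chars.isdigit c || PySem.Chars.isalpha c) = true := by
  unfold pvKind
  by_cases h1 : PySem.Chars.isdigit c = true <;> by_cases h2 : PySem.Chars.isalpha c = true <;>
    simp [h1, h2]

theorem pv_dig_not_alpha (c : Char) (h : PySem.Chars.isdigit c = true) :
    PySem.Chars.isalpha c = false := by
  simp [PySem.Chars.isdigit, PySem.Chars.isalpha, PySem.Chars.isupper, PySem.Chars.islower,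
    Char.le_def, UInt32.le_iff_toNat_le] at *
  omega

theorem isalpha_of_kind (c : Char) (h : pvKind c ≠ 2) :
    PySem.Chars.isalpha c = decide (pvKind c = 1) := by
  unfold pvKind at *
  by_cases h1 : PySem.Chars.isdigit c = true
  · simp [h1, pv_dig_not_alpha c h1]
  · by_cases h2 : PySem.Chars.isalpha c = true
    · simp [h1, h2]
    · simp [h1, h2] at h

-- B's run length in closed form
theorem pvRunLen_eq (cs : List Char) (k : Nat) (n : Nat) :
    pvRunLen cs k n = n + ((cs.drop n).takeWhile (fun d => decide (pvKind d = k))).length := by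
  fun_induction pvRunLen cs k n with
  | case1 n h ih =>
    obtain ⟨hlt, hk⟩ := h
    rw [ih]
    have hd : cs.drop n = cs[n] :: cs.drop (n + 1) := List.drop_eq_getElem_cons hlt
    rw [hd, List.takeWhile_cons_of_pos (by simpa [List.getD_eq_getElem?_getD, hlt] using hk)]
    simp; omega
  | case2 n h =>
    rcases Nat.lt_or_ge n cs.length with hlt | hge
    · have hk : ¬ pvKind (cs.getD n ' ') = k := by tauto
      have hd : cs.drop n = cs[n] :: cs.drop (n + 1) := List.drop_eq_getElem_cons hlt
      rw [hd, List.takeWhile_cons_of_neg (by simpa [List.getD_eq_getElem?_getD, hlt] using hk)]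
      simp
    · rw [List.drop_eq_nil_of_le hge]; simp

-- take/drop of a takeWhile-length split
theorem take_takeWhile_len (p : Char → Bool) (cs : List Char) :
    cs.take (cs.takeWhile p).length = cs.takeWhile p := by
  have h := List.takeWhile_append_dropWhile (p := p) (l := cs)
  calc cs.take (cs.takeWhile p).length
      = (cs.takeWhile p ++ cs.dropWhile p).take (cs.takeWhile p).length := by rw [h]
    _ = cs.takeWhile p := List.take_left

theorem drop_takeWhile_len (p : Char → Bool) (cs : List Char) :
    cs.drop (cs.takeWhile p).length = cs.dropWhile p := by
  have h := List.takeWhile_append_dropWhile (p := p) (l := cs)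
  calc cs.drop (cs.takeWhile p).length
      = (cs.takeWhile p ++ cs.dropWhile p).drop (cs.takeWhile p).length := by rw [h]
    _ = cs.dropWhile p := List.drop_left

-- B = pvG
theorem pvB_loop_eq (rest : List Char) (parts : List String) :
    pvB_loop rest parts = parts ++ pvG rest := by
  fun_induction pvB_loop rest parts with
  | case1 rest parts h =>
    simp [List.isEmpty_iff] at h
    simp [h, pvG_nil]
  | case2 rest parts hne k n ih =>
    simp [List.isEmpty_iff] at hne
    obtain ⟨c, cs, rfl⟩ := List.exists_cons_of_ne_nil hne
    have hk : k = pvKind c := by simp [k]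
    have hn : n = 1 + (cs.takeWhile (fun d => decide (pvKind d = k))).length := by
      simp only [n, pvRunLen_eq (c :: cs) k 1, List.drop_one, List.tail_cons]
    rw [dite_eq_ite] at ih
    rw [ih, pvG_cons, ← hk]
    have htake : (c :: cs).take n = c :: cs.takeWhile (fun d => decide (pvKind d = k)) := by
      rw [hn, Nat.add_comm, List.take_succ_cons, take_takeWhile_len]
    have hdrop : (c :: cs).drop n = cs.dropWhile (fun d => decide (pvKind d = k)) := by
      rw [hn, Nat.add_comm, List.drop_succ_cons, drop_takeWhile_len]
    rw [htake, hdrop]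
    by_cases h2 : k = 2 <;> simp [h2]

-- A = pvG (simultaneous statement for empty and nonempty buffer)
theorem pvA_loop_eq (cs : List Char) :
    cs.all pvValid = true →
      (∀ parts, pvA_loop cs parts [] = parts ++ pvG cs) ∧
      (∀ parts buf k, buf ≠ [] → (∀ c ∈ buf, pvKind c = k) → k ≠ 2 →
        pvA_loop cs parts buf =
          parts ++ String.mk (buf ++ cs.takeWhile (fun d => decide (pvKind d = k))) ::
            pvG (cs.dropWhile (fun d => decide (pvKind d = k)))) := by
  induction cs with
  | nil =>
    intro _
    constructor
    · intro parts; simp [pvA_loop, pvG_nil]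
    · intro parts buf k hne _ _
      simp [pvA_loop, List.isEmpty_iff, hne, pvG_nil]
  | cons c cs ih =>
    intro hall
    simp only [List.all_cons, Bool.and_eq_true] at hall
    obtain ⟨hc, hcs⟩ := hall
    obtain ⟨ih1, ih2⟩ := ih hcs
    constructor
    · -- empty buffer
      intro parts
      by_cases hda : (PySem.Chars.isdigit c || PySem.Chars.isalpha c) = true
      · -- digit or alpha: start a new buffer [c]
        have hk2 : pvKind c ≠ 2 := (pvKind_ne_two_iff c).2 hda
        rw [pvA_loop]
        simp only [hda, if_true, List.isEmpty_nil, Bool.not_true, Bool.false_and,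
          Bool.false_eq_true, if_neg, ite_false, List.nil_append]
        rw [ih2 parts [c] (pvKind c) (by simp) (by simp) hk2]
        rw [pvG_cons]
        simp [hk2]
      · -- separator
        have hsep : (PySem.Chars.isspace c || c == ',') = true := by
          simp only [pvValid, Bool.or_eq_true] at hc
          rcases hc with ((h1 | h2) | h3) | h4 <;> simp_all
        have hk2 : pvKind c = 2 := by
          by_contra h; exact hda ((pvKind_ne_two_iff c).1 h)
        rw [pvA_loop]
        simp only [hda, Bool.false_eq_true, if_neg, ite_false, hsep, if_true, ite_true,
          List.isEmpty_nil, if_pos]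
        rw [ih1 parts, pvG_cons_sep c cs hk2]
    · -- nonempty buffer of uniform kind k ≠ 2
      intro parts buf k hne huni hk2
      have hlast : buf.getLastD ' ' ∈ buf := by
        obtain ⟨b, bs, rfl⟩ := List.exists_cons_of_ne_nil hne
        simpa [List.getLastD] using List.getLast_mem (l := b :: bs) (by simp)
      have hlastk : pvKind (buf.getLastD ' ') = k := huni _ hlast
      have hlastalpha : PySem.Chars.isalpha (buf.getLastD ' ') = decide (k = 1) := by
        rw [isalpha_of_kind _ (by rw [hlastk]; exact hk2), hlastk]
      by_cases hda : (PySem.Chars.isdigit c || PySem.Chars.isalpha c) = true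
      · have hck2 : pvKind c ≠ 2 := (pvKind_ne_two_iff c).2 hda
        have hcalpha : PySem.Chars.isalpha c = decide (pvKind c = 1) :=
          isalpha_of_kind c hck2
        by_cases heq : pvKind c = k
        · -- same kind: extend buffer
          have hcond : (!buf.isEmpty &&
              (PySem.Chars.isalpha (buf.getLastD ' ') != PySem.Chars.isalpha c)) = false := by
            rw [hlastalpha, hcalpha, heq]; simp
          rw [pvA_loop]
          simp only [hda, if_true, hcond, Bool.false_eq_true, if_neg, ite_false]
          rw [ih2 parts (buf ++ [c]) k (by simp) (by intro x hx; rcases List.mem_append.1 hx with h | h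
                                                     · exact huni x h
                                                     · simp at h; subst h; exact heq) hk2]
          rw [List.takeWhile_cons_of_pos (by simp [heq]),
              List.dropWhile_cons_of_pos (by simp [heq])]
          simp
        · -- kind change: flush then start [c]
          have hcond : (!buf.isEmpty &&
              (PySem.Chars.isalpha (buf.getLastD ' ') != PySem.Chars.isalpha c)) = true := by
            rw [hlastalpha, hcalpha]
            have : pvKind c ≠ 2 := hck2
            have hk01 : k = 0 ∨ k = 1 := by
              unfold pvKind at hlastk
              have := huni _ hlast
              split_ifs at hlastk <;> omega
            have hc01 : pvKind c = 0 ∨ pvKind c = 1 := by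
              unfold pvKind at *
              split_ifs at * <;> omega
            simp [List.isEmpty_iff, hne]
            rcases hk01 with rfl | rfl <;> rcases hc01 with h | h <;> simp_all
          rw [pvA_loop]
          simp only [hda, if_true, hcond, if_pos, ite_true]
          rw [ih2 (parts ++ [String.mk buf]) [c] (pvKind c) (by simp) (by simp) hck2]
          rw [List.takeWhile_cons_of_neg (by simp [heq]),
              List.dropWhile_cons_of_neg (by simp [heq])]
          rw [pvG_cons]
          simp [hck2]
      · -- separator: flush
        have hsep : (PySem.Chars.isspace c || c == ',') = true := by
          simp only [pvValid, Bool.or_eq_true] at hc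
          rcases hc with ((h1 | h2) | h3) | h4 <;> simp_all
        have hck2 : pvKind c = 2 := by
          by_contra h; exact hda ((pvKind_ne_two_iff c).1 h)
        rw [pvA_loop]
        simp only [hda, Bool.false_eq_true, if_neg, ite_false, hsep, if_true, ite_true,
          List.isEmpty_iff, hne, if_neg]
        rw [ih1 (parts ++ [String.mk buf])]
        rw [List.takeWhile_cons_of_neg (by simp [hck2, hk2]; omega),
            List.dropWhile_cons_of_neg (by simp [hck2, hk2]; omega),
            pvG_cons_sep c cs hck2]
        simp

-- ===== VERDICT (by name: the statement is the Claim_ definition above) =====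
theorem split_into_parts_py_spec : Claim_equal_split_into_parts_py := by
  intro raw _ hpre
  unfold Spec_split_into_parts_py split_into_parts_py split_into_parts_py_alt
  have hpre' : raw.toList.all pvValid = true := hpre
  rw [(pvA_loop_eq raw.toList hpre').1 [], pvB_loop_eq]
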